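-- pv_equiv track=rewrite | github.com/thisAbdU/A2SV-contest-Exercises | C_Ras_Alula_and_The_Decrypted_Messages.py | ras_alula
-- ===== SOURCE A (Python) =====
-- def ras_alula(n, w):
--     prefix = 0
--     for i in range(len(w)):
--         prefix += (ord(w[i]) - ord('a'))
--     prefi = [0]
--     current = 0
--     for i in range(len(n)):
--         current += (ord(n[i]) - ord('a'))
--         prefi.append(current)
--     j = 0
--     while j <= len(n) - len(w):
--         if prefi[j + len(w)] - prefi[j] == prefix:
--             return "YES"
--         j += 1
--
--     return "NO"
-- ===== SOURCE B (Python) =====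
-- def ras_alula(n, w):
--     lw = len(w)
--     if len(n) < lw:
--         return "NO"
--     target = sum(ord(c) - 97 for c in w)
--     cur = sum(ord(c) - 97 for c in n[:lw])
--     if cur == target:
--         return "YES"
--     for i in range(lw, len(n)):
--         cur += (ord(n[i]) - 97) - (ord(n[i - lw]) - 97)
--         if cur == target:
--             return "YES"
--     return "NO"
-- ===== Notes on version B (the rewrite author's own statement) =====
-- stated objective: idiomatic
-- what changed: Replaces the O(n)-space prefix-sum array with a single rolling window sum updated in O(1) per slide, with an early length check.
import Mathlib
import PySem

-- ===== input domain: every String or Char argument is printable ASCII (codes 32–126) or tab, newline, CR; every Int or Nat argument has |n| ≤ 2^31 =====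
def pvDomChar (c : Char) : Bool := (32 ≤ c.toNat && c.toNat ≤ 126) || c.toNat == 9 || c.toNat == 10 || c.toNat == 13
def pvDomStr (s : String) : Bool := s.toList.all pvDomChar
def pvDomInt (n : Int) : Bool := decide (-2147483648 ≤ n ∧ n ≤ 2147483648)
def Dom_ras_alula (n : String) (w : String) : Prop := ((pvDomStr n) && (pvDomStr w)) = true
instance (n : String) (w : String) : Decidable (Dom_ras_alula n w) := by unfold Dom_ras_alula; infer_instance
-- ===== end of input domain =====

-- B replaces A's prefix-sum array by a single rolling window sum (O(1) extra space); objective: idiomatic.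

-- ===== PORT A =====
-- one step of the loop building the prefix-sum list `prefi`
def rasAStep (st : List Int × Int) (x : Int) : List Int × Int :=
  (st.1 ++ [st.2 + x], st.2 + x)

-- the `while j <= len(n) - len(w)` loop; `fuel` = number of remaining iterations
def rasALoop (prefi : List Int) (lw : Nat) (target : Int) : Nat → Nat → String
  | 0, _ => "NO"
  | fuel+1, j =>
    if prefi.getD (j + lw) 0 - prefi.getD j 0 = target then "YES"
    else rasALoop prefi lw target fuel (j + 1)

def ras_alula (n : String) (w : String) : String :=
  let wc := w.toList
  let nc := n.toList
  let target := wc.foldl (fun acc c => acc + ((c.toNat : Int) - 97)) 0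
  let prefi := (nc.foldl (fun st c => rasAStep st ((c.toNat : Int) - 97)) ([0], 0)).1
  -- j runs while j ≤ len n - len w (Python ints): that is (len n - len w + 1) iterations if lw ≤ len n, else 0
  let fuel := if wc.length ≤ nc.length then nc.length - wc.length + 1 else 0
  rasALoop prefi wc.length target fuel 0

-- ===== PORT B =====
-- the sliding loop `for i in range(lw, len(n))` over the precomputed letter values
def rasBLoop (vals : List Int) (lw : Nat) (target : Int) : Int → Nat → Nat → String
  | _, _, 0 => "NO"
  | cur, i, fuel+1 =>
    let cur' := cur + vals.getD i 0 - vals.getD (i - lw) 0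
    if cur' = target then "YES" else rasBLoop vals lw target cur' (i + 1) fuel

def ras_alula_alt (n : String) (w : String) : String :=
  let lw := w.toList.length
  let vals := n.toList.map (fun c => (c.toNat : Int) - 97)
  if vals.length < lw then "NO"
  else
    let target := (w.toList.map (fun c => (c.toNat : Int) - 97)).sum
    let cur := (vals.take lw).sum
    if cur = target then "YES"
    else rasBLoop vals lw target cur lw (vals.length - lw)

-- ===== PRECONDITION & SPEC =====
def Spec_ras_alula (n : String) (w : String) (out : String) : Prop := out = ras_alula_alt n w
instance (n : String) (w : String) (out : String) : Decidable (Spec_ras_alula n w out) := by unfold Spec_ras_alula; infer_instance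

-- ===== CLAIM (what is proved, stated in full; the proofs are below) =====
def Claim_equal_ras_alula : Prop := ∀ (n : String) (w : String), Dom_ras_alula n w → Spec_ras_alula n w (ras_alula n w)

-- ===== LEMMAS AND PROOFS =====

-- window sum of length lw starting at j, expressed via prefix sums
def rasW (vals : List Int) (lw : Nat) (j : Nat) : Int :=
  (vals.take (j + lw)).sum - (vals.take j).sum

theorem foldl_add_map {A : Type} (f : A → Int) (l : List A) (s : Int) :
    l.foldl (fun a c => a + f c) s = s + (l.map f).sum := by
  induction l generalizing s with
  | nil => simp
  | cons x xs ih => simp [ih, add_assoc]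

theorem rasA_fold (xs : List Int) (l : List Int) (s : Int) :
    xs.foldl rasAStep (l, s)
      = (l ++ (List.range xs.length).map (fun k => s + (xs.take (k+1)).sum), s + xs.sum) := by
  induction xs generalizing l s with
  | nil => simp
  | cons x xs ih =>
    simp only [List.foldl_cons, rasAStep, ih, List.length_cons, List.range_succ_eq_map,
      List.map_cons, List.map_map, Prod.mk.injEq]
    refine ⟨?_, by simp [add_assoc]⟩
    rw [List.append_assoc]
    congr 1
    rw [List.singleton_append]
    congr 1
    · simp
    · simp only [Function.comp_def]
      refine List.map_congr_left fun k _ => ?_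
      simp [add_assoc]

theorem rasA_prefi (xs : List Int) :
    (xs.foldl rasAStep ([0], 0)).1
      = (List.range (xs.length + 1)).map (fun k => (xs.take k).sum) := by
  rw [rasA_fold]
  simp [List.range_succ_eq_map, List.map_map, Function.comp_def]

theorem rasA_prefi_chars (f : Char → Int) (cs : List Char) :
    (cs.foldl (fun st c => rasAStep st (f c)) ([0], 0)).1
      = (List.range ((cs.map f).length + 1)).map (fun k => ((cs.map f).take k).sum) := by
  have h := List.foldl_map (f := f) (g := rasAStep) (l := cs) (init := (([0] : List Int), (0 : Int)))
  rw [← h, rasA_prefi]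

theorem rasA_prefi_getD (xs : List Int) (k : Nat) (hk : k ≤ xs.length) :
    ((List.range (xs.length + 1)).map (fun k => (xs.take k).sum)).getD k 0
      = (xs.take k).sum := by
  rw [List.getD_eq_getElem?_getD, List.getElem?_map, List.getElem?_range (by omega)]
  simp

theorem any_congr_mem {A : Type} (l : List A) (p q : A → Bool)
    (h : ∀ a ∈ l, p a = q a) : l.any p = l.any q := by
  induction l with
  | nil => rfl
  | cons a l ih => simp_all

theorem any_range_succ (m : Nat) (p : Nat → Bool) :
    (List.range (m + 1)).any p = (p 0 || (List.range m).any (fun k => p (k + 1))) := by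
  rw [List.range_succ_eq_map]
  simp [List.any_map, Function.comp_def]

theorem rasALoop_eq (prefi : List Int) (lw : Nat) (target : Int) :
    ∀ fuel j, rasALoop prefi lw target fuel j
      = if (List.range fuel).any
            (fun k => prefi.getD (j + k + lw) 0 - prefi.getD (j + k) 0 = target)
        then "YES" else "NO" := by
  intro fuel
  induction fuel with
  | zero => intro j; simp [rasALoop]
  | succ m ih =>
    intro j
    rw [rasALoop, any_range_succ]
    by_cases h : prefi.getD (j + lw) 0 - prefi.getD j 0 = target
    · have hb : decide (prefi.getD (j + 0 + lw) 0 - prefi.getD (j + 0) 0 = target) = true := by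
        simpa using h
      rw [if_pos h, hb, Bool.true_or, if_pos rfl]
    · have hb : decide (prefi.getD (j + 0 + lw) 0 - prefi.getD (j + 0) 0 = target) = false := by
        simpa using h
      rw [if_neg h, ih (j + 1), hb, Bool.false_or]
      have harr : ∀ k, j + 1 + k = j + (k + 1) := by omega
      simp only [harr]

-- P (k+1) = P k + vals[k] for k < len
theorem take_succ_sum (vals : List Int) (k : Nat) (hk : k < vals.length) :
    (vals.take (k+1)).sum = (vals.take k).sum + vals.getD k 0 := by
  have h : vals.take (k+1) = vals.take k ++ [vals[k]] := by
    rw [List.take_add_one, List.getElem?_eq_getElem hk]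
    rfl
  rw [h, List.sum_append, List.getD_eq_getElem?_getD, List.getElem?_eq_getElem hk]
  simp

theorem rasW_succ (vals : List Int) (lw : Nat) (j i : Nat) (hij : j + lw = i)
    (hi : i < vals.length) :
    rasW vals lw (j + 1) = rasW vals lw j + vals.getD i 0 - vals.getD j 0 := by
  subst hij
  unfold rasW
  have h1 : (vals.take (j + 1 + lw)).sum = (vals.take (j + lw)).sum + vals.getD (j + lw) 0 := by
    have := take_succ_sum vals (j + lw) hi
    rw [← this]; congr 2; omega
  have h2 : (vals.take (j + 1)).sum = (vals.take j).sum + vals.getD j 0 :=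
    take_succ_sum vals j (by omega)
  rw [h1, h2]; ring

theorem rasBLoop_eq (vals : List Int) (lw : Nat) (target : Int) :
    ∀ fuel i cur, lw ≤ i → i + fuel = vals.length → cur = rasW vals lw (i - lw) →
    rasBLoop vals lw target cur i fuel
      = if (List.range fuel).any (fun k => rasW vals lw (i - lw + 1 + k) = target)
        then "YES" else "NO" := by
  intro fuel
  induction fuel with
  | zero => intro i cur _ _ _; simp [rasBLoop]
  | succ m ih =>
    intro i cur hlw hlen hcur
    rw [rasBLoop]
    have hi : i < vals.length := by omega
    have hcur' : cur + vals.getD i 0 - vals.getD (i - lw) 0 = rasW vals lw (i - lw + 1) := by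
      rw [hcur, ← rasW_succ vals lw (i - lw) i (by omega) hi]
    rw [any_range_succ]
    by_cases h : cur + vals.getD i 0 - vals.getD (i - lw) 0 = target
    · have hb : decide (rasW vals lw (i - lw + 1 + 0) = target) = true := by
        simp only [Nat.add_zero]
        rw [← hcur']; simpa using h
      rw [if_pos h, hb, Bool.true_or, if_pos rfl]
    · have hb : decide (rasW vals lw (i - lw + 1 + 0) = target) = false := by
        simp only [Nat.add_zero]
        rw [← hcur']; simpa using h
      rw [if_neg h, ih (i + 1) _ (by omega) (by omega) (by rw [hcur']; congr 1; omega),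
        hb, Bool.false_or]
      have harr : ∀ k, i + 1 - lw + 1 + k = i - lw + 1 + (k + 1) := by omega
      simp only [harr]

theorem ras_alula_eq_alt (n w : String) : ras_alula n w = ras_alula_alt n w := by
  unfold ras_alula ras_alula_alt
  have ht := foldl_add_map (fun c => ((c.toNat : Int) - 97)) w.toList 0
  have hpref := rasA_prefi_chars (fun c => ((c.toNat : Int) - 97)) n.toList
  simp only [ht, zero_add, hpref]
  set vals : List Int := n.toList.map (fun c => ((c.toNat : Int) - 97)) with hvals
  set target : Int := (w.toList.map (fun c => ((c.toNat : Int) - 97))).sum with htar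
  set lw := w.toList.length with hlw
  have hln : vals.length = n.toList.length := by rw [hvals]; simp
  by_cases hle : lw ≤ n.toList.length
  · rw [if_pos hle, if_neg (by omega)]
    set m := n.toList.length - lw with hm
    rw [rasALoop_eq]
    have hA : (List.range (m + 1)).any
        (fun k => ((List.range (vals.length + 1)).map (fun k => (vals.take k).sum)).getD (0 + k + lw) 0
          - ((List.range (vals.length + 1)).map (fun k => (vals.take k).sum)).getD (0 + k) 0 = target)
        = (List.range (m + 1)).any (fun k => rasW vals lw k = target) := by
      apply any_congr_mem
      intro k hk
      rw [List.mem_range] at hk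
      rw [rasA_prefi_getD vals (0 + k + lw) (by omega), rasA_prefi_getD vals (0 + k) (by omega)]
      simp [rasW]
    rw [hA, any_range_succ]
    have hcur0 : rasW vals lw 0 = (vals.take lw).sum := by simp [rasW]
    by_cases h0 : (vals.take lw).sum = target
    · have hb : decide (rasW vals lw 0 = target) = true := by rw [hcur0]; simpa using h0
      rw [if_pos h0, hb, Bool.true_or, if_pos rfl]
    · have hb : decide (rasW vals lw 0 = target) = false := by rw [hcur0]; simpa using h0
      rw [if_neg h0, hb, Bool.false_or,
        rasBLoop_eq vals lw target (vals.length - lw) lw ((vals.take lw).sum) le_rfl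
          (by omega) (by rw [hcur0.symm]; congr 1; omega)]
      have hml : vals.length - lw = m := by omega
      have harr : ∀ k : Nat, lw - lw + 1 + k = k + 1 := by omega
      simp only [hml, harr]
  · rw [if_neg hle, if_pos (by omega)]
    rfl

-- ===== VERDICT (by name: the statement is the Claim_ definition above) =====
theorem ras_alula_spec : Claim_equal_ras_alula := by
  intro n w _
  exact ras_alula_eq_alt n w
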